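-- pv_equiv track=rewrite | github.com/Yennayer/Baleares_Game | baleares.py | creer_grille
-- ===== SOURCE A (Python) =====
-- def creer_grille(taille_n):
--     # Créeation de la grille de taille n
--     grille = [[' ' for i in range(taille_n)] for j in range(taille_n)]
--     # Remplissage de la grille
--     for l in range(taille_n):
--         for c in range(taille_n):
--             if l < 2:
--                 grille[l][c] = 'o'
--             if l > taille_n - 3:
--                 grille[l][c] = 'x'
--     return grille
-- ===== SOURCE B (Python) =====
-- def creer_grille(taille_n):
--     # Two-phase build: blank grid, then overwrite the top o band
--     # and finally the bottom 'x' band row by row ('x' wins on overlap).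
--     grille = [[' '] * taille_n for _ in range(taille_n)]
--     for l in range(min(2, taille_n)):
--         grille[l] = ['o'] * taille_n
--     for l in range(max(0, taille_n - 2), taille_n):
--         grille[l] = ['x'] * taille_n
--     return grille
-- ===== Notes on version B (the rewrite author's own statement) =====
-- stated objective: simpler
-- what changed: Replaces the per-cell nested loop with two row-level band overwrites on a blank grid, filling whole rows at once with list repetition.
import Mathlib
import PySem

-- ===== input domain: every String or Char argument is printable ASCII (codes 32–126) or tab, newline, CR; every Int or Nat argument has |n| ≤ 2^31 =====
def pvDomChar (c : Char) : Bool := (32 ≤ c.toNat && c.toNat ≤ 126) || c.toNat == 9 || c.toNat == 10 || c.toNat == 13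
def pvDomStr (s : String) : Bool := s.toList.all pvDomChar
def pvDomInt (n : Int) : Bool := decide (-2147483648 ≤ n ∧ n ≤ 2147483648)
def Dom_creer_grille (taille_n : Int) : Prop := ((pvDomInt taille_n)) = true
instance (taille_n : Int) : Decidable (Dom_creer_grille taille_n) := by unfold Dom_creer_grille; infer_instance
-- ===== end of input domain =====

-- B replaces A's per-cell nested loop by two row-level band overwrites on a blank grid (objective: simpler).

-- ===== PORT A =====
-- literal transliteration of A: blank n×n grid, then nested loop over (l, c) with two per-cell conditional writes
def creer_grille (taille_n : Int) : List (List String) :=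
  let grille := (PySem.List.pyRange 0 taille_n 1).map (fun _j =>
    (PySem.List.pyRange 0 taille_n 1).map (fun _i => " "))
  (PySem.List.pyRange 0 taille_n 1).foldl (fun g l =>
    (PySem.List.pyRange 0 taille_n 1).foldl (fun g c =>
      let g1 := if l < 2 then g.set l.toNat ((g.getD l.toNat []).set c.toNat "o") else g
      if l > taille_n - 3 then g1.set l.toNat ((g1.getD l.toNat []).set c.toNat "x") else g1
    ) g) grille

-- ===== PORT B =====
-- literal transliteration of B: blank grid, then overwrite the top 'o' band and the bottom 'x' band row by row
def creer_grille_alt (taille_n : Int) : List (List String) :=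
  let grille := (PySem.List.pyRange 0 taille_n 1).map (fun _ =>
    List.replicate taille_n.toNat " ")
  let grille := (PySem.List.pyRange 0 (min 2 taille_n) 1).foldl
    (fun g l => g.set l.toNat (List.replicate taille_n.toNat "o")) grille
  (PySem.List.pyRange (max 0 (taille_n - 2)) taille_n 1).foldl
    (fun g l => g.set l.toNat (List.replicate taille_n.toNat "x")) grille

-- ===== PRECONDITION & SPEC =====
def Spec_creer_grille (taille_n : Int) (out : List (List String)) : Prop := out = creer_grille_alt taille_n
instance (taille_n : Int) (out : List (List String)) : Decidable (Spec_creer_grille taille_n out) := by unfold Spec_creer_grille; infer_instance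

-- ===== CLAIM (what is proved, stated in full; the proofs are below) =====
def Claim_equal_creer_grille : Prop := ∀ (taille_n : Int), Dom_creer_grille taille_n → Spec_creer_grille taille_n (creer_grille taille_n)

-- ===== LEMMAS AND PROOFS =====

-- the common value of both programs, row by row
def pvSpecGrid (n : Int) : List (List String) :=
  (List.range n.toNat).map (fun (j : ℕ) =>
    List.replicate n.toNat (if n - 3 < (j : Int) then "x" else if (j : Int) < 2 then "o" else " "))

-- folding `set i v` over a list of indices, read back elementwise
theorem pv_getElem?_foldl_set {α : Type} (is : List ℕ) (g : List α) (v : α) (j : ℕ) :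
    (is.foldl (fun g i => g.set i v) g)[j]? =
      if j ∈ is ∧ j < g.length then some v else g[j]? := by
  induction is generalizing g with
  | nil => simp
  | cons i is ih =>
    simp only [List.foldl_cons, ih, List.length_set, List.getElem?_set, List.mem_cons]
    by_cases h1 : j ∈ is <;> by_cases h2 : j < g.length <;> by_cases h3 : i = j <;>
      (simp [h1, h2, h3]; try omega)

-- setting every position of a full-length row yields a replicate
theorem pv_setAll {α : Type} (m : ℕ) (r : List α) (v : α) (hr : r.length = m) :
    (List.range m).foldl (fun r i => r.set i v) r = List.replicate m v := by
  apply List.ext_getElem?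
  intro j
  rw [pv_getElem?_foldl_set]
  by_cases hj : j < m
  · simp [hj, hr]
  · simp only [List.mem_range, hr]
    simp [hj, List.getElem?_eq_none (by omega : r.length ≤ j)]

-- fold over `pyRange a b 1` of nat-index sets, read back elementwise
theorem pv_foldl_pyRange_set {α : Type} (a b : Int) (ha : 0 ≤ a) (g : List α) (v : α) (j : ℕ) :
    ((PySem.List.pyRange a b 1).foldl (fun g l => g.set l.toNat v) g)[j]? =
      if a ≤ (j : Int) ∧ (j : Int) < b ∧ j < g.length then some v else g[j]? := by
  have h : (PySem.List.pyRange a b 1).foldl (fun g l => g.set l.toNat v) g =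
      ((PySem.List.pyRange a b 1).map Int.toNat).foldl (fun g i => g.set i v) g := by
    rw [List.foldl_map]
  rw [h, pv_getElem?_foldl_set]
  congr 1
  simp only [List.mem_map, PySem.List.mem_pyRange_one, eq_iff_iff]
  constructor
  · rintro ⟨⟨x, ⟨hax, hxb⟩, hxj⟩, hjl⟩
    refine ⟨by omega, by omega, hjl⟩
  · rintro ⟨h1, h2, hjl⟩
    exact ⟨⟨(j : Int), ⟨by omega, by omega⟩, by omega⟩, hjl⟩

theorem pv_length_foldl_pyRange_set {α : Type} (is : List Int) (g : List α) (v : α) :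
    (is.foldl (fun g l => g.set l.toNat v) g).length = g.length := by
  induction is generalizing g with
  | nil => rfl
  | cons i is ih => simp [ih]

-- value of row j in the finished grid
def pvVal (n : Int) (j : ℕ) : String :=
  if n - 3 < (j : Int) then "x" else if (j : Int) < 2 then "o" else " "

-- the grid after A's outer loop has processed rows 0 … k-1
def pvG (n : Int) (k : ℕ) : List (List String) :=
  (List.range n.toNat).map (fun j => List.replicate n.toNat (if j < k then pvVal n j else " "))

theorem pv_spec_eq_pvG (n : Int) : pvSpecGrid n = pvG n n.toNat := by
  unfold pvSpecGrid pvG pvVal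
  exact List.map_congr_left (fun j hj => by rw [if_pos (List.mem_range.mp hj)])

theorem pv_pvG_getElem? (n : Int) (k j : ℕ) :
    (pvG n k)[j]? =
      if j < n.toNat then some (List.replicate n.toNat (if j < k then pvVal n j else " "))
      else none := by
  unfold pvG
  rcases Nat.lt_or_ge j n.toNat with hj | hj
  · rw [List.getElem?_map, List.getElem?_range hj, if_pos hj, Option.map_some]
  · rw [List.getElem?_eq_none (by simpa using hj), if_neg (by omega)]

theorem pv_alt_eq_spec (n : Int) : creer_grille_alt n = pvSpecGrid n := by
  unfold creer_grille_alt
  rw [pv_spec_eq_pvG, List.map_const']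
  simp only [PySem.List.length_pyRange_one, Int.sub_zero]
  apply List.ext_getElem?
  intro j
  rw [pv_foldl_pyRange_set _ _ (le_max_left 0 _), pv_length_foldl_pyRange_set,
      pv_foldl_pyRange_set _ _ le_rfl, pv_pvG_getElem?]
  simp only [List.length_replicate, List.getElem?_replicate, pvVal]
  split_ifs <;> first | rfl | omega

theorem pv_foldl_id {α β : Type} (cs : List β) (g : α) :
    cs.foldl (fun g _ => g) g = g := by
  induction cs generalizing g with
  | nil => rfl
  | cons c cs ih => simp [ih]

theorem pv_getD_set (g : List (List String)) (L : ℕ) (r : List String) (hL : L < g.length) :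
    (g.set L r).getD L [] = r := by
  rw [List.getD_eq_getElem _ _ (by simpa using hL), List.getElem_set_self]

-- a grid fold that only rewrites row L factors through a row-level fold
theorem pv_fold_row (cs : List Int) (L : ℕ) (step : List String → Int → List String)
    (F : List (List String) → Int → List (List String))
    (hF : ∀ g c, L < g.length → F g c = g.set L (step (g.getD L []) c)) :
    ∀ (g : List (List String)), L < g.length →
      cs.foldl F g = g.set L (cs.foldl step (g.getD L [])) := by
  induction cs with
  | nil =>
    intro g hL
    rw [List.foldl_nil, List.foldl_nil, List.getD_eq_getElem _ _ hL, List.set_getElem_self]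
  | cons c cs ih =>
    intro g hL
    rw [List.foldl_cons, List.foldl_cons, hF g c hL, ih _ (by simpa using hL),
        pv_getD_set _ _ _ hL, List.set_set]

theorem pv_row_fill (n : Int) (r : List String) (v : String) (hr : r.length = n.toNat) :
    (PySem.List.pyRange 0 n 1).foldl (fun r c => r.set c.toNat v) r = List.replicate n.toNat v := by
  rw [PySem.List.pyRange_one, List.foldl_map]
  simp only [zero_add, Int.toNat_natCast, Int.sub_zero]
  exact pv_setAll _ _ _ hr

-- A's inner loop over the columns of row l, reduced to one conditional row overwrite
theorem pv_innerA (n l : Int) (g : List (List String)) (hlen : l.toNat < g.length)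
    (hrow : (g.getD l.toNat []).length = n.toNat) :
    ((PySem.List.pyRange 0 n 1).foldl (fun g c =>
      let g1 := if l < 2 then g.set l.toNat ((g.getD l.toNat []).set c.toNat "o") else g
      if l > n - 3 then g1.set l.toNat ((g1.getD l.toNat []).set c.toNat "x") else g1) g) =
    if l > n - 3 then g.set l.toNat (List.replicate n.toNat "x")
    else if l < 2 then g.set l.toNat (List.replicate n.toNat "o")
    else g := by
  have hF : ∀ (g : List (List String)) (c : Int), l.toNat < g.length →
      (let g1 := if l < 2 then g.set l.toNat ((g.getD l.toNat []).set c.toNat "o") else g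
       if l > n - 3 then g1.set l.toNat ((g1.getD l.toNat []).set c.toNat "x") else g1) =
      g.set l.toNat
        ((fun r c => let r1 := if l < 2 then r.set c.toNat "o" else r
                     if l > n - 3 then r1.set c.toNat "x" else r1) (g.getD l.toNat []) c) := by
    intro g c hL
    by_cases ho : l < 2 <;> by_cases hx : l > n - 3
    · simp only [if_pos ho, if_pos hx]
      rw [pv_getD_set _ _ _ hL, List.set_set]
    · simp only [if_pos ho, if_neg hx]
    · simp only [if_neg ho, if_pos hx]
    · simp only [if_neg ho, if_neg hx]
      rw [List.getD_eq_getElem _ _ hL, List.set_getElem_self]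
  rw [pv_fold_row _ l.toNat
      (fun r c => let r1 := if l < 2 then r.set c.toNat "o" else r
                  if l > n - 3 then r1.set c.toNat "x" else r1) _ hF g hlen]
  by_cases hx : l > n - 3
  · rw [if_pos hx]
    have hstep : (fun (r : List String) (c : Int) =>
        let r1 := if l < 2 then r.set c.toNat "o" else r
        if l > n - 3 then r1.set c.toNat "x" else r1) =
        fun r c => r.set c.toNat "x" := by
      funext r c
      by_cases ho : l < 2
      · simp only [if_pos ho, if_pos hx, List.set_set]
      · simp only [if_neg ho, if_pos hx]
    rw [hstep, pv_row_fill _ _ _ hrow]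
  · rw [if_neg hx]
    by_cases ho : l < 2
    · rw [if_pos ho]
      have hstep : (fun (r : List String) (c : Int) =>
          let r1 := if l < 2 then r.set c.toNat "o" else r
          if l > n - 3 then r1.set c.toNat "x" else r1) =
          fun r c => r.set c.toNat "o" := by
        funext r c
        simp only [if_pos ho, if_neg hx]
      rw [hstep, pv_row_fill _ _ _ hrow]
    · have hstep : (fun (r : List String) (c : Int) =>
          let r1 := if l < 2 then r.set c.toNat "o" else r
          if l > n - 3 then r1.set c.toNat "x" else r1) =
          fun r _ => r := by
        funext r c
        simp only [if_neg ho, if_neg hx]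
      rw [hstep, pv_foldl_id, List.getD_eq_getElem _ _ hlen, List.set_getElem_self, if_neg ho]

theorem pv_pvG_getD (n : Int) (k j : ℕ) (hj : j < n.toNat) :
    (pvG n k).getD j [] = List.replicate n.toNat (if j < k then pvVal n j else " ") := by
  have h := pv_pvG_getElem? n k j
  rw [if_pos hj] at h
  rw [List.getD_eq_getElem _ _ (by simp [pvG, hj]), (List.getElem?_eq_some_iff.mp h).2]

-- one outer-loop step advances pvG by one row
theorem pv_stepA (n : Int) (k : ℕ) (hk : k < n.toNat) :
    ((PySem.List.pyRange 0 n 1).foldl (fun g c =>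
      let g1 := if (k : Int) < 2 then
          g.set (k : Int).toNat ((g.getD (k : Int).toNat []).set c.toNat "o") else g
      if (k : Int) > n - 3 then
          g1.set (k : Int).toNat ((g1.getD (k : Int).toNat []).set c.toNat "x") else g1)
      (pvG n k)) = pvG n (k + 1) := by
  rw [pv_innerA n (k : Int) (pvG n k)
      (by simpa [pvG, Int.toNat_natCast] using hk)
      (by rw [Int.toNat_natCast, pv_pvG_getD n k k hk]; simp)]
  simp only [Int.toNat_natCast]
  apply List.ext_getElem?
  intro j
  by_cases hx : (k : Int) > n - 3
  · rw [if_pos hx, List.getElem?_set, pv_pvG_getElem?, pv_pvG_getElem?]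
    simp only [pvG, List.length_map, List.length_range]
    by_cases hkj : k = j
    · subst hkj
      rw [if_pos rfl, if_pos hk, if_pos hk, if_pos (by omega)]
      have hv : pvVal n k = "x" := by unfold pvVal; rw [if_pos hx]
      rw [hv]
    · rw [if_neg hkj]
      rcases Nat.lt_or_ge j n.toNat with hj | hj
      · rw [if_pos hj, if_pos hj]
        congr 2
        by_cases hjk : j < k
        · rw [if_pos hjk, if_pos (by omega)]
        · rw [if_neg hjk, if_neg (by omega)]
      · rw [if_neg (by omega), if_neg (by omega)]
  · rw [if_neg hx]
    by_cases ho : (k : Int) < 2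
    · rw [if_pos ho, List.getElem?_set, pv_pvG_getElem?, pv_pvG_getElem?]
      simp only [pvG, List.length_map, List.length_range]
      by_cases hkj : k = j
      · subst hkj
        rw [if_pos rfl, if_pos hk, if_pos hk, if_pos (by omega)]
        have hv : pvVal n k = "o" := by unfold pvVal; rw [if_neg hx, if_pos ho]
        rw [hv]
      · rw [if_neg hkj]
        rcases Nat.lt_or_ge j n.toNat with hj | hj
        · rw [if_pos hj, if_pos hj]
          congr 2
          by_cases hjk : j < k
          · rw [if_pos hjk, if_pos (by omega)]
          · rw [if_neg hjk, if_neg (by omega)]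
        · rw [if_neg (by omega), if_neg (by omega)]
    · rw [if_neg ho, pv_pvG_getElem?, pv_pvG_getElem?]
      rcases Nat.lt_or_ge j n.toNat with hj | hj
      · rw [if_pos hj, if_pos hj]
        congr 2
        by_cases hjk : j < k
        · rw [if_pos hjk, if_pos (by omega)]
        · rw [if_neg hjk]
          by_cases hjk1 : j < k + 1
          · have hjeq : j = k := by omega
            subst hjeq
            rw [if_pos hjk1]
            have hv : pvVal n j = " " := by unfold pvVal; rw [if_neg hx, if_neg ho]
            rw [hv]
          · rw [if_neg hjk1]
      · rw [if_neg (by omega), if_neg (by omega)]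

theorem pv_G0 (n : Int) : pvG n 0 = List.replicate n.toNat (List.replicate n.toNat " ") := by
  unfold pvG
  rw [show (fun j => List.replicate n.toNat (if j < 0 then pvVal n j else " ")) =
      (fun _ : ℕ => List.replicate n.toNat " ") from
      funext (fun j => by rw [if_neg (Nat.not_lt_zero j)]),
    List.map_const', List.length_range]

theorem pv_a_eq_spec (n : Int) : creer_grille n = pvSpecGrid n := by
  unfold creer_grille
  rw [pv_spec_eq_pvG]
  have hinit : (PySem.List.pyRange 0 n 1).map (fun _j =>
      (PySem.List.pyRange 0 n 1).map (fun _i => (" " : String))) = pvG n 0 := by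
    rw [List.map_const', List.map_const', pv_G0]
    simp [PySem.List.length_pyRange_one]
  rw [hinit]
  have key : ∀ k : ℕ, k ≤ n.toNat →
      (PySem.List.pyRange 0 (k : Int) 1).foldl (fun g l =>
        (PySem.List.pyRange 0 n 1).foldl (fun g c =>
          let g1 := if l < 2 then g.set l.toNat ((g.getD l.toNat []).set c.toNat "o") else g
          if l > n - 3 then g1.set l.toNat ((g1.getD l.toNat []).set c.toNat "x") else g1) g)
        (pvG n 0) = pvG n k := by
    intro k
    induction k with
    | zero =>
      intro _
      rw [PySem.List.pyRange_one_eq_nil (a := 0) (b := ((0 : ℕ) : Int)) (by omega),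
          List.foldl_nil]
    | succ k ih =>
      intro hk
      rw [show ((k + 1 : ℕ) : Int) = (k : Int) + 1 by push_cast; ring,
          PySem.List.pyRange_one_succ_right (by omega : (0 : Int) ≤ (k : Int)),
          List.foldl_append, ih (by omega), List.foldl_cons, List.foldl_nil]
      simp only []
      rw [pv_stepA n k (by omega)]
  by_cases hn : 0 ≤ n
  · have h := key n.toNat le_rfl
    rw [Int.toNat_of_nonneg hn] at h
    exact h
  · rw [PySem.List.pyRange_one_eq_nil (a := 0) (b := n) (by omega), List.foldl_nil,
        show n.toNat = 0 by omega]

-- ===== VERDICT (by name: the statement is the Claim_ definition above) =====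
theorem creer_grille_spec : Claim_equal_creer_grille := by
  intro n _
  unfold Spec_creer_grille
  rw [pv_a_eq_spec, pv_alt_eq_spec]
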